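-- pv_equiv track=rewrite | github.com/Prichystal72/Final_pcb_to_kicad | ui_main.py | _detect_prefixes
-- ===== SOURCE A (Python) =====
-- def _detect_prefixes(lib_names: list[str]) -> list[str]:
--     """Extract unique library prefixes (text before first '_') from names."""
--     prefixes: dict[str, int] = {}
--     for name in lib_names:
--         if "_" in name:
--             prefix = name.split("_")[0] + "_"
--         else:
--             prefix = name
--         prefixes[prefix] = prefixes.get(prefix, 0) + 1
--     # Return prefixes that group at least 2 libs, sorted
--     return sorted(p for p, cnt in prefixes.items() if cnt >= 2)
-- ===== SOURCE B (Python) =====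
-- def _detect_prefixes(lib_names: list[str]) -> list[str]:
--     """Extract unique library prefixes (text before first '_') from names.
--
--     Sort the per-name prefixes once, then scan runs of equal prefixes;
--     a run of length >= 2 contributes its key. No frequency dict, and the
--     output is already in sorted order.
--     """
--     ps = sorted(
--         (name.split("_")[0] + "_" if "_" in name else name) for name in lib_names
--     )
--     out = []
--     i = 0
--     n = len(ps)
--     while i < n:
--         j = i
--         while j < n and ps[j] == ps[i]:
--             j += 1
--         if j - i >= 2:
--             out.append(ps[i])
--         i = j
--     return out
-- ===== Notes on version B (the rewrite author's own statement) =====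
-- stated objective: alternative
-- what changed: Replaces the frequency dictionary plus final sort of A with sort-first-then-run-scan: B sorts the list of per-name prefixes once and walks runs of equal adjacent prefixes, emitting each run key whose run length is at least 2, so no dict is maintained and no separate sort of the keys is needed.
import Mathlib
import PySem

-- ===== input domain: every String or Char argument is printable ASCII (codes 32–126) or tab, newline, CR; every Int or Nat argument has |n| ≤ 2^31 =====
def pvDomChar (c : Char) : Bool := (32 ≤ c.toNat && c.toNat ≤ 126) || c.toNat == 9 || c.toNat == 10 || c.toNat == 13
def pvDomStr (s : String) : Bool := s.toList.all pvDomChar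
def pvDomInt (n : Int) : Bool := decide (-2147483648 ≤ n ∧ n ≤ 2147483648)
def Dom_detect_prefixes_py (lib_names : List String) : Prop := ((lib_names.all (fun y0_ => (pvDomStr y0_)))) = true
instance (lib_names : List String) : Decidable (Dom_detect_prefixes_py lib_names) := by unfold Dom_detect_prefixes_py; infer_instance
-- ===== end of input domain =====

-- ===== PORT A =====
-- B changes the strategy (sorted prefixes + run scan instead of a frequency dict + final sort); objective: alternative (same cost).
-- Shared prefix rule: name.split("_")[0] + "_" if "_" in name else name
-- (split? "_" is always `some` since the separator is nonempty; getD [] only discharges the Option)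
def pvPrefix (name : String) : String :=
  if PySem.Str.isIn "_" name then
    (((PySem.Str.split? name "_").getD []).headD "") ++ "_"
  else name

def detect_prefixes_py (lib_names : List String) : List String :=
  let prefixes : PySem.Dict String Int :=
    lib_names.foldl (fun d name =>
      let p := pvPrefix name
      d.insert p (d.getD p 0 + 1)) PySem.Dict.empty
  PySem.List.sorted ((prefixes.items.filter (fun pc => decide (2 ≤ pc.2))).map Prod.fst)
    (fun x => x) false

-- ===== PORT B =====
-- the outer while loop of Source B: each iteration consumes one run ps[i..j) of equal elements
def pvRuns : List String → List String
  | [] => []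
  | x :: rest =>
    let run := rest.takeWhile (fun y => y == x)
    let tail := rest.dropWhile (fun y => y == x)
    (if 2 ≤ run.length + 1 then [x] else []) ++ pvRuns tail
termination_by l => l.length
decreasing_by
  simp only [List.length_cons]
  exact Nat.lt_succ_of_le (List.length_dropWhile_le _ _)

def detect_prefixes_py_alt (lib_names : List String) : List String :=
  pvRuns (PySem.List.sorted (lib_names.map pvPrefix) (fun x => x) false)

-- ===== PRECONDITION & SPEC =====
def Spec_detect_prefixes_py (lib_names : List String) (out : List String) : Prop := out = detect_prefixes_py_alt lib_names
instance (lib_names : List String) (out : List String) : Decidable (Spec_detect_prefixes_py lib_names out) := by unfold Spec_detect_prefixes_py; infer_instance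

-- ===== CLAIM (what is proved, stated in full; the proofs are below) =====
def Claim_equal_detect_prefixes_py : Prop := ∀ (lib_names : List String), Dom_detect_prefixes_py lib_names → Spec_detect_prefixes_py lib_names (detect_prefixes_py lib_names)

-- ===== LEMMAS AND PROOFS =====

-- the first element left by dropWhile fails the predicate
theorem pvDropHead (p : String → Bool) : ∀ (rest : List String) (b : String) (t : List String),
    rest.dropWhile p = b :: t → p b = false := by
  intro rest
  induction rest with
  | nil => intro b t h; simp [List.dropWhile] at h
  | cons a as ih =>
    intro b t h
    by_cases hpa : p a = true
    · rw [List.dropWhile_cons_of_pos hpa] at h; exact ih b t h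
    · rw [List.dropWhile_cons_of_neg hpa] at h
      cases h; simpa using hpa

-- in a (≤)-sorted list x :: rest, everything after the run of x's is strictly greater than x
theorem pvLtTail (x : String) (rest : List String)
    (h : (x :: rest).Pairwise (· ≤ ·)) :
    ∀ z ∈ rest.dropWhile (fun y => y == x), x < z := by
  intro z hz
  have hle : ∀ w ∈ rest, x ≤ w := (List.pairwise_cons.mp h).1
  rcases hdrop : rest.dropWhile (fun y => y == x) with _ | ⟨b, t⟩
  · rw [hdrop] at hz; cases hz
  · have hbx : b ≠ x := by
      have := pvDropHead (fun y => y == x) rest b t hdrop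
      simpa using this
    have hbmem : b ∈ rest := (List.dropWhile_sublist _).subset (by rw [hdrop]; simp)
    have hxb : x < b := lt_of_le_of_ne (hle b hbmem) (Ne.symm hbx)
    have htail_pw : (b :: t).Pairwise (· ≤ ·) := by
      rw [← hdrop]; exact (h.of_cons).sublist (List.dropWhile_sublist _)
    rw [hdrop] at hz
    rcases List.mem_cons.mp hz with rfl | hz'
    · exact hxb
    · exact lt_of_lt_of_le hxb ((List.pairwise_cons.mp htail_pw).1 z hz')

-- on a (≤)-sorted list, pvRuns returns exactly the elements of count ≥ 2
theorem pvRuns_mem : ∀ {l : List String}, l.Pairwise (· ≤ ·) → ∀ (y : String),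
    (y ∈ pvRuns l ↔ 2 ≤ l.count y) := by
  intro l
  induction l using pvRuns.induct with
  | case1 => simp [pvRuns]
  | case2 x rest tl ih =>
    intro h y
    have hrt : rest.takeWhile (fun y => y == x) ++ rest.dropWhile (fun y => y == x) = rest :=
      List.takeWhile_append_dropWhile
    have hrun_all : ∀ z ∈ rest.takeWhile (fun y => y == x), z = x := by
      intro z hz
      have := List.mem_takeWhile_imp hz
      simpa using this
    have htail_pw : (rest.dropWhile (fun y => y == x)).Pairwise (· ≤ ·) :=
      (h.of_cons).sublist (List.dropWhile_sublist _)
    have hlt : ∀ z ∈ rest.dropWhile (fun y => y == x), x < z := pvLtTail x rest h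
    have hcx_tail : (rest.dropWhile (fun y => y == x)).count x = 0 := by
      rw [List.count_eq_zero]
      intro hx; exact absurd (hlt x hx) (lt_irrefl x)
    have hcx : (x :: rest).count x = (rest.takeWhile (fun y => y == x)).length + 1 := by
      have hcr : (rest.takeWhile (fun y => y == x)).count x = (rest.takeWhile (fun y => y == x)).length :=
        List.count_eq_length.mpr (by intro z hz; exact ((hrun_all z hz).symm))
      rw [List.count_cons_self]
      conv_lhs => rw [← hrt]
      rw [List.count_append, hcr, hcx_tail]
    have ihy := ih htail_pw
    simp only [pvRuns]
    by_cases hyx : y = x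
    · subst hyx
      have hnot : ¬ (2 ≤ (rest.dropWhile (fun z => z == y)).count y) := by
        rw [hcx_tail]; omega
      have hnm : y ∉ pvRuns (rest.dropWhile (fun z => z == y)) := fun hm => hnot ((ihy y).mp hm)
      constructor
      · intro hm
        rcases List.mem_append.mp hm with hm | hm
        · rw [hcx]
          by_cases h2 : 2 ≤ (rest.takeWhile (fun z => z == y)).length + 1
          · omega
          · rw [if_neg h2] at hm; cases hm
        · exact absurd hm hnm
      · intro hc
        rw [hcx] at hc
        rw [if_pos hc]
        exact List.mem_append_left _ (by simp)
    · have hcy : (x :: rest).count y = (rest.dropWhile (fun z => z == x)).count y := by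
        have hcr : (rest.takeWhile (fun z => z == x)).count y = 0 := by
          rw [List.count_eq_zero]; intro hy; exact hyx (hrun_all y hy)
        have hxy : (x == y) = false := beq_eq_false_iff_ne.mpr (fun hh => hyx hh.symm)
        rw [List.count_cons]
        conv_lhs => rw [← hrt]
        rw [List.count_append, hcr, hxy]
        simp
      rw [hcy, ← ihy y]
      constructor
      · intro hm
        rcases List.mem_append.mp hm with hm | hm
        · exfalso; apply hyx
          by_cases h2 : 2 ≤ (rest.takeWhile (fun z => z == x)).length + 1
          · rw [if_pos h2] at hm; simpa using hm
          · rw [if_neg h2] at hm; cases hm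
        · exact hm
      · intro hm; exact List.mem_append_right _ hm

-- on a (≤)-sorted list, pvRuns is strictly increasing
theorem pvRuns_pairwise : ∀ {l : List String}, l.Pairwise (· ≤ ·) →
    (pvRuns l).Pairwise (· < ·) := by
  intro l
  induction l using pvRuns.induct with
  | case1 => simp [pvRuns]
  | case2 x rest tl ih =>
    intro h
    have htail_pw : (rest.dropWhile (fun y => y == x)).Pairwise (· ≤ ·) :=
      (h.of_cons).sublist (List.dropWhile_sublist _)
    have hlt : ∀ z ∈ rest.dropWhile (fun y => y == x), x < z := pvLtTail x rest h
    have ihp := ih htail_pw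
    simp only [pvRuns]
    have hmem : ∀ z ∈ pvRuns (rest.dropWhile (fun y => y == x)), x < z := by
      intro z hz
      have hc := (pvRuns_mem htail_pw z).mp hz
      exact hlt z (List.count_pos_iff.mp (by omega))
    by_cases h2 : 2 ≤ (rest.takeWhile (fun y => y == x)).length + 1
    · rw [if_pos h2]
      exact List.pairwise_append.mpr ⟨by simp, ihp, by
        intro a ha b hb
        simp only [List.mem_singleton] at ha
        subst ha; exact hmem b hb⟩
    · rw [if_neg h2]; simpa using ihp

theorem detect_prefixes_py_spec : Claim_equal_detect_prefixes_py := by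
  intro lib_names _
  unfold Spec_detect_prefixes_py detect_prefixes_py detect_prefixes_py_alt
  set ps : List String := lib_names.map pvPrefix with hps
  -- A's dict loop is the counter of ps
  have hfold : lib_names.foldl (fun d name =>
      let p := pvPrefix name
      d.insert p (d.getD p 0 + 1)) PySem.Dict.empty = PySem.Dict.counter ps := by
    have h1 := PySem.Dict.foldl_insert_getD_add_one_eq_counter (lib_names.map pvPrefix)
    rw [List.foldl_map] at h1
    exact h1
  simp only [hfold, PySem.Dict.items_counter]
  -- the filtered keys
  rw [List.filter_map, List.map_map]
  have hmapfst : (Prod.fst ∘ fun k => (k, (ps.count k : Int))) = id := rfl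
  rw [hmapfst, List.map_id]
  set S : List String := (PySem.Set.ofList ps).filter
      ((fun pc : String × Int => decide (2 ≤ pc.2)) ∘ fun k => (k, (ps.count k : Int))) with hS
  set l : List String := PySem.List.sorted ps (fun x => x) false with hl
  have hlpw : l.Pairwise (· ≤ ·) := PySem.List.sorted_pairwise ps (fun x => x)
  have hcount : ∀ y, l.count y = ps.count y :=
    fun y => (PySem.List.sorted_perm ps (fun x => x) false).count_eq y
  have hSmem : ∀ y, y ∈ S ↔ 2 ≤ ps.count y := by
    intro y
    rw [hS, List.mem_filter, PySem.Set.mem_ofList]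
    constructor
    · rintro ⟨_, hd⟩
      simp only [Function.comp] at hd
      exact_mod_cast of_decide_eq_true hd
    · intro hc
      refine ⟨List.count_pos_iff.mp (by omega), ?_⟩
      simp only [Function.comp]
      exact decide_eq_true (by exact_mod_cast hc)
  have hSnd : S.Nodup := (PySem.Set.nodup_ofList ps).filter _
  have hBpw : (pvRuns l).Pairwise (· < ·) := pvRuns_pairwise hlpw
  have hBnd : (pvRuns l).Nodup := hBpw.imp (fun h => ne_of_lt h)
  have hperm : (pvRuns l).Perm S := by
    rw [List.perm_ext_iff_of_nodup hBnd hSnd]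
    intro y
    rw [pvRuns_mem hlpw y, hcount y, hSmem y]
  exact (PySem.List.sorted_eq_of_perm_of_pairwise_lt S (pvRuns l) (fun x => x) hperm hBpw)
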